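-- pv_equiv track=rewrite | github.com/seantywork/seantywork | radare2/buffer_overflow.py | DeadbeefOverflowPayload
-- ===== SOURCE A (Python) =====
-- def DeadbeefOverflowPayload(bytes_len, endian):
--
--     char_code = 64
--
--     stuff_payload =  ""
--
--     for i in range(bytes_len):
--
--         if i % 10 == 0 :
--
--             char_code += 1
--
--         if char_code == 91 :
--
--             char_code = 65
--
--         stuff_payload += chr(char_code)
--
--
--
--     if endian == "big":
--         byte_payload = b"\xde\xad\xbe\xef"
--
--     elif endian == "little":
--         byte_payload = b"\xef\xbe\xad\xde"
--
--
--     payload = "\""+stuff_payload+"\"" + " + "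
--
--
--     byte_output = str(byte_payload).replace('b','',1)
--
--     byte_output = byte_output.replace('\'','')
--
--     payload += "\""+byte_output+"\""
--
--
--     return payload
-- ===== SOURCE B (Python) =====
-- def DeadbeefOverflowPayload(bytes_len, endian):
--     # block-based closed form: position i holds chr(65 + (i//10) % 26)
--     n = max(bytes_len, 0)
--     blocks = (n + 9) // 10
--     joined = "".join(chr(65 + (b % 26)) * 10 for b in range(blocks))
--     stuff = joined[:bytes_len]
--     byte_output = {"big": "\\xde\\xad\\xbe\\xef", "little": "\\xef\\xbe\\xad\\xde"}[endian]
--     return '"' + stuff + '" + "' + byte_output + '"'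
-- ===== Notes on version B (the rewrite author's own statement) =====
-- stated objective: simpler
-- what changed: Replaces the per-character loop with a mutating char_code counter (increment every 10th step, wrap at 91) by a closed-form block construction: join 10-char blocks chr(65+(b%26))*10 over block indices and truncate, and replaces the str(bytes)/replace/strip formatting by the literal escape strings.
-- outside the precondition, e.g. on DeadbeefOverflowPayload(5, 'middle'): A raises UnboundLocalError, B raises KeyError
import Mathlib
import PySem

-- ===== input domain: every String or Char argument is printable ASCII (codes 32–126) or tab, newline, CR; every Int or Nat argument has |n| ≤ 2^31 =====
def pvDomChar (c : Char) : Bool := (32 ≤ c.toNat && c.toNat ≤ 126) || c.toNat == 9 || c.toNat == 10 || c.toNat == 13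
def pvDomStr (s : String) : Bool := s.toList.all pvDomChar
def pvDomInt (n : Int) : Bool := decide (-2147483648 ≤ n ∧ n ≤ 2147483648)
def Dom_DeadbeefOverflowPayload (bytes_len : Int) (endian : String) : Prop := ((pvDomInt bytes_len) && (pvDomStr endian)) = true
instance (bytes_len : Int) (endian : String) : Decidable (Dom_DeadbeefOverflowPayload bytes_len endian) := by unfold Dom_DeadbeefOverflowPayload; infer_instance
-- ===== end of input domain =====

-- B replaces A's mutating char_code counter by a closed-form block construction (simpler decomposition, same cost); return value only.

-- ===== PORT A =====
-- hand port of s.replace(old, '', 1): remove the first occurrence (exact for nonempty old)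
def pvReplaceOnce (s old : String) : String :=
  let i := PySem.Str.find s old
  if i == -1 then s
  else String.mk (s.toList.take i.toNat ++ s.toList.drop (i.toNat + old.toList.length))

def DeadbeefOverflowPayload (bytes_len : Int) (endian : String) : String :=
  -- the loop, char by char (Python string concatenation ported at the List Char level)
  let st := (PySem.List.pyRange 0 bytes_len 1).foldl
    (fun (st : Int × List Char) i =>
      let cc := if PySem.Int.mod i 10 == 0 then st.1 + 1 else st.1
      let cc := if cc == 91 then (65 : Int) else cc
      (cc, st.2 ++ [Char.ofNat cc.toNat])) (64, [])
  let stuff := st.2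
  -- str(byte_payload): repr of the constant bytes literal (all four bytes non-printable, so all hex escapes); exact.
  -- an unknown endian raises in Python (byte_payload unbound) and is excluded by Pre_; the else branch is the 'little' constant
  let bps : String := if endian == "big" then "b'\\xde\\xad\\xbe\\xef'" else "b'\\xef\\xbe\\xad\\xde'"
  let bo := pvReplaceOnce bps "b"
  let bo := PySem.Str.replace bo "'" ""
  String.mk ('"' :: stuff ++ '"' :: " + ".toList ++ '"' :: bo.toList ++ ['"'])

-- ===== PORT B =====
def DeadbeefOverflowPayload_alt (bytes_len : Int) (endian : String) : String :=
  let n := max bytes_len 0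
  let blocks := PySem.Int.floordiv (n + 9) 10
  let joined := PySem.Chars.join []
    ((PySem.List.pyRange 0 blocks 1).map
      (fun b => List.replicate 10 (Char.ofNat (65 + PySem.Int.mod b 26).toNat)))
  let stuff := PySem.List.slice joined none (some bytes_len)
  -- dict-literal lookup; an unknown endian raises KeyError and is excluded by Pre_
  let bo : String := if endian == "big" then "\\xde\\xad\\xbe\\xef" else "\\xef\\xbe\\xad\\xde"
  String.mk ('"' :: stuff ++ '"' :: " + ".toList ++ '"' :: bo.toList ++ ['"'])

-- ===== PRECONDITION & SPEC =====
-- Pre_ excludes exactly the endian values other than "big"/"little", on which A raises UnboundLocalError (byte_payload is never assigned).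
def Pre_DeadbeefOverflowPayload (bytes_len : Int) (endian : String) : Prop :=
  endian = "big" ∨ endian = "little"
instance (bytes_len : Int) (endian : String) : Decidable (Pre_DeadbeefOverflowPayload bytes_len endian) := by unfold Pre_DeadbeefOverflowPayload; infer_instance

def pvWitness_DeadbeefOverflowPayload : Int × String := (23, "big")

def Spec_DeadbeefOverflowPayload (bytes_len : Int) (endian : String) (out : String) : Prop := out = DeadbeefOverflowPayload_alt bytes_len endian
instance (bytes_len : Int) (endian : String) (out : String) : Decidable (Spec_DeadbeefOverflowPayload bytes_len endian out) := by unfold Spec_DeadbeefOverflowPayload; infer_instance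

-- ===== CLAIM (what is proved, stated in full; the proofs are below) =====
def Claim_equal_DeadbeefOverflowPayload : Prop := ∀ (bytes_len : Int) (endian : String), Dom_DeadbeefOverflowPayload bytes_len endian → Pre_DeadbeefOverflowPayload bytes_len endian → Spec_DeadbeefOverflowPayload bytes_len endian (DeadbeefOverflowPayload bytes_len endian)

-- ===== LEMMAS AND PROOFS =====

-- the character at position k of the stuffing string
def pvF (k : Nat) : Char := Char.ofNat (65 + k / 10 % 26)
def pvCC (k : Nat) : Int := if k = 0 then 64 else 65 + ((k - 1 : Nat) / 10 % 26 : Nat)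

theorem pvAloop (n : Nat) :
    (PySem.List.pyRange 0 (n : Int) 1).foldl
      (fun (st : Int × List Char) i =>
        let cc := if PySem.Int.mod i 10 == 0 then st.1 + 1 else st.1
        let cc := if cc == 91 then (65 : Int) else cc
        (cc, st.2 ++ [Char.ofNat cc.toNat])) (64, [])
      = (pvCC n, (List.range n).map pvF) := by
  induction n with
  | zero => simp [PySem.List.pyRange_one_eq_nil, pvCC]
  | succ n ih =>
    have h : ((n + 1 : Nat) : Int) = (n : Int) + 1 := by push_cast; ring
    rw [h, PySem.List.pyRange_one_succ_right (by positivity), List.foldl_append, ih]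
    simp only [List.foldl_cons, List.foldl_nil]
    have hmod : PySem.Int.mod (n : Int) 10 = ((n % 10 : Nat) : Int) := by
      simp only [PySem.Int.mod, Int.fmod_eq_emod]
      omega
    have hcc : (if (if PySem.Int.mod (n : Int) 10 == 0 then pvCC n + 1 else pvCC n) == 91 then (65 : Int)
        else (if PySem.Int.mod (n : Int) 10 == 0 then pvCC n + 1 else pvCC n))
        = ((65 + n / 10 % 26 : Nat) : Int) := by
      rw [hmod]
      simp only [pvCC, beq_iff_eq]
      by_cases h0 : n = 0
      · subst h0; decide
      · simp only [h0, if_false]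
        split_ifs <;> push_cast at * <;> omega
    simp only [hcc]
    rw [Prod.mk.injEq]
    refine ⟨?_, ?_⟩
    · simp only [pvCC, Nat.add_one_ne_zero, if_false]
      push_cast; omega
    · rw [List.range_succ, List.map_append]
      simp only [List.map, pvF]
      congr 1

theorem pvJoinFlatten (l : List (List Char)) : PySem.Chars.join [] l = l.flatten := by
  induction l with
  | nil => simp [PySem.Chars.join, List.intercalate]
  | cons x xs ih =>
    cases xs with
    | nil => simp [PySem.Chars.join, List.intercalate]
    | cons y ys =>
      rw [PySem.Chars.join_cons_cons, ih]
      simp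

theorem pvBlocks (B : Nat) :
    ((List.range B).map (fun b => List.replicate 10 (Char.ofNat (65 + b % 26)))).flatten
      = (List.range (10 * B)).map pvF := by
  induction B with
  | zero => simp
  | succ B ih =>
    rw [List.range_succ, List.map_append, List.flatten_append, ih]
    have h10 : 10 * (B + 1) = 10 * B + 10 := by ring
    rw [h10, List.range_add, List.map_append]
    congr 1
    have hfl : (List.map (fun b => List.replicate 10 (Char.ofNat (65 + b % 26))) [B]).flatten
        = List.replicate 10 (Char.ofNat (65 + B % 26)) := by simp
    rw [hfl]
    refine List.ext_getElem (by simp) ?_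
    intro i h1 h2
    simp only [List.getElem_replicate, List.getElem_map, List.getElem_range]
    unfold pvF
    congr 2
    simp at h2
    omega

theorem pvSliceNil (b : Int) : PySem.List.slice ([] : List Char) none (some b) = [] := by
  simp [PySem.List.slice]

theorem pvFloordivCast (m : Nat) : PySem.Int.floordiv ((m : Int) + 9) 10 = (((m + 9) / 10 : Nat) : Int) := by
  simp only [PySem.Int.floordiv, Int.fdiv_eq_ediv]
  omega

theorem pvModCast (k : Nat) : PySem.Int.mod ((0 : Int) + (k : Int)) 26 = ((k % 26 : Nat) : Int) := by
  simp only [PySem.Int.mod, Int.fmod_eq_emod]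
  omega

theorem pvStuff (bytes_len : Int) :
    ((PySem.List.pyRange 0 bytes_len 1).foldl
      (fun (st : Int × List Char) i =>
        let cc := if PySem.Int.mod i 10 == 0 then st.1 + 1 else st.1
        let cc := if cc == 91 then (65 : Int) else cc
        (cc, st.2 ++ [Char.ofNat cc.toNat])) (64, [])).2
      = PySem.List.slice
          (PySem.Chars.join []
            ((PySem.List.pyRange 0 (PySem.Int.floordiv (max bytes_len 0 + 9) 10) 1).map
              (fun b => List.replicate 10 (Char.ofNat (65 + PySem.Int.mod b 26).toNat))))
          none (some bytes_len) := by
  by_cases hn : 0 ≤ bytes_len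
  · obtain ⟨n, rfl⟩ := Int.eq_ofNat_of_zero_le hn
    rw [max_eq_left (by positivity), pvFloordivCast]
    set B := (n + 9) / 10 with hB
    rw [pvAloop]
    rw [PySem.List.pyRange_one, List.map_map]
    have hmap : (List.range ((B : Int) - 0).toNat).map
        ((fun b => List.replicate 10 (Char.ofNat (65 + PySem.Int.mod b 26).toNat)) ∘ (fun k : Nat => (0 : Int) + k))
        = (List.range B).map (fun b => List.replicate 10 (Char.ofNat (65 + b % 26))) := by
      have : ((B : Int) - 0).toNat = B := by omega
      rw [this]
      refine List.map_congr_left ?_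
      intro k _
      simp only [Function.comp, pvModCast]
      congr 2
    rw [hmap, pvJoinFlatten, pvBlocks, PySem.List.slice_to _ (Int.natCast_nonneg n)]
    rw [← List.map_take, List.take_range]
    have hmin : min ((n : Int)).toNat (10 * B) = n := by omega
    rw [hmin]
  · rw [PySem.List.pyRange_one_eq_nil (by omega), max_eq_right (by omega)]
    simp only [List.foldl_nil]
    have h0 : PySem.Int.floordiv ((0 : Int) + 9) 10 = 0 := by
      simp only [PySem.Int.floordiv, Int.fdiv_eq_ediv]; omega
    rw [h0, PySem.List.pyRange_one_eq_nil (by omega)]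
    simp only [List.map_nil]
    rw [pvJoinFlatten]
    simp only [List.flatten_nil]
    exact (pvSliceNil bytes_len).symm

-- ===== VERDICT (by name: the statement is the Claim_ definition above) =====
theorem DeadbeefOverflowPayload_spec : Claim_equal_DeadbeefOverflowPayload := by
  intro bytes_len endian _ hpre
  unfold Spec_DeadbeefOverflowPayload DeadbeefOverflowPayload DeadbeefOverflowPayload_alt
  have hst := pvStuff bytes_len
  rcases hpre with h | h <;> subst h <;> dsimp only [] <;> rw [hst] <;> congr 1
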